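-- pv_equiv track=rewrite | github.com/Steph-kim/Algorithms | Array/teamFormation.py | countTeams
-- ===== SOURCE A (Python) =====
-- def countTeams(rating, queries):
--
--     res = []
--     for l, r in queries:
--         seen = {}
--         teams = 0
--         if r <= len(rating):
--             for i in range(l-1, r):
--                 if rating[i] != 0:
--                     if rating[i] in seen and rating[i] != 0:
--                         teams += 1
--                         index = seen[rating[i]]
--                         seen.pop(rating[i])
--                         rating[index] = 0
--                         rating[i] = 0
--                     else:
--                         seen[rating[i]] = i
--         res.append(teams)
--     return res
-- ===== SOURCE B (Python) =====
-- def countTeams(rating, queries):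
--     res = []
--     for l, r in queries:
--         teams = 0
--         if r <= len(rating):
--             groups = {}
--             for i in range(l - 1, r):
--                 v = rating[i]
--                 if v != 0:
--                     groups.setdefault(v, []).append(i)
--             for idxs in groups.values():
--                 pairs = len(idxs) // 2
--                 teams += pairs
--                 for i in idxs[:2 * pairs]:
--                     rating[i] = 0
--         res.append(teams)
--     return res
-- ===== Notes on version B (the rewrite author's own statement) =====
-- stated objective: alternative
-- what changed: Replaces A's running seen-map greedy pairing (pair-and-zero as the scan goes) by a two-phase computation per query: build a value-to-index-list table over the window, then for each value add len//2 teams and zero the first 2*(len//2) indices.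
-- outside the precondition, e.g. on countTeams([1, 1, 1], [(0, 3)]): A returns [1], B returns [2]
import Mathlib
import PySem

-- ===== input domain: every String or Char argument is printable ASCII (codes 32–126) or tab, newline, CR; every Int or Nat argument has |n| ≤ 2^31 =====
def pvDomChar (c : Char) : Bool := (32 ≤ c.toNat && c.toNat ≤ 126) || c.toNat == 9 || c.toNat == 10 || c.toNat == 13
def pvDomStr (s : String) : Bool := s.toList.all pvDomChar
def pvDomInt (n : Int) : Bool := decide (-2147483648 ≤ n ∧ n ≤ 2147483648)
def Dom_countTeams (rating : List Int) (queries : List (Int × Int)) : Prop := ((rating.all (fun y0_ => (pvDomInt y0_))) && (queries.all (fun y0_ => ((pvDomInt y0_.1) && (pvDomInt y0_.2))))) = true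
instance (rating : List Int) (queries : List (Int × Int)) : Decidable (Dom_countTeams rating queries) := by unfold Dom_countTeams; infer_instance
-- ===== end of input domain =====

-- B replaces A's running seen-map greedy pairing by a two-phase per-query computation
-- (group window indices by value, then count len//2 pairs per value and zero the first
-- 2*(len//2) indices); both mutate `rating` identically on Pre_, and the equivalence
-- proved here covers the returned list (the states agree query by query).

-- ===== PORT A =====
-- one iteration of A's inner loop: state = (rating, seen, teams)
def pvStepA (st : List Int × PySem.Dict Int Int × Int) (i : Int) :
    List Int × PySem.Dict Int Int × Int :=
  let v := PySem.List.pyGetD st.1 i 0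
  if v ≠ 0 then
    if st.2.1.contains v ∧ v ≠ 0 then
      let index := st.2.1.getD v 0
      let seen := st.2.1.erase v
      (PySem.List.pySetD (PySem.List.pySetD st.1 index 0) i 0, seen, st.2.2 + 1)
    else
      (st.1, st.2.1.insert v i, st.2.2)
  else st

-- one query of A: returns (mutated rating, teams appended to res)
def pvQueryA (rat : List Int) (q : Int × Int) : List Int × Int :=
  if q.2 ≤ PySem.List.len rat then
    let fin := (PySem.List.pyRange (q.1 - 1) q.2 1).foldl pvStepA (rat, PySem.Dict.empty, 0)
    (fin.1, fin.2.2)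
  else (rat, 0)

def countTeams (rating : List Int) (queries : List (Int × Int)) : List Int :=
  (queries.foldl (fun st q =>
    let out := pvQueryA st.1 q
    (out.1, st.2 ++ [out.2])) (rating, ([] : List Int))).2

-- ===== PORT B =====
-- first phase of B's query: group window indices by (nonzero) value
def pvBuildB (rat : List Int) (l r : Int) : PySem.Dict Int (List Int) :=
  (PySem.List.pyRange (l - 1) r 1).foldl (fun d i =>
    let v := PySem.List.pyGetD rat i 0
    if v ≠ 0 then d.modify v [] (fun idxs => idxs ++ [i]) else d) PySem.Dict.empty

-- 'for i in idxs: rating[i] = 0'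
def pvZeroB (rat : List Int) (idxs : List Int) : List Int :=
  idxs.foldl (fun a p => PySem.List.pySetD a p 0) rat

-- one query of B: returns (mutated rating, teams)
def pvQueryB (rat : List Int) (q : Int × Int) : List Int × Int :=
  if q.2 ≤ PySem.List.len rat then
    let groups := pvBuildB rat q.1 q.2
    groups.values.foldl (fun s idxs =>
      let pairs : Nat := idxs.length / 2
      (pvZeroB s.1 (idxs.take (2 * pairs)), s.2 + (pairs : Int))) (rat, 0)
  else (rat, 0)

def countTeams_alt (rating : List Int) (queries : List (Int × Int)) : List Int :=
  (queries.foldl (fun st q =>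
    let out := pvQueryB st.1 q
    (out.1, st.2 ++ [out.2])) (rating, ([] : List Int))).2

-- ===== PRECONDITION & SPEC =====
-- Pre_ excludes queries whose scanned window reaches an index below -len(rating)
-- (there A — and B alike — raises IndexError), and scanned windows longer than the
-- array, where Python's negative-index wraparound makes A revisit the same position
-- after possibly zeroing it mid-scan — an artefact of A's in-place pass on which
-- B's snapshot grouping may defensibly differ (see the cited excluded example).
def Pre_countTeams (rating : List Int) (queries : List (Int × Int)) : Prop :=
  ∀ q ∈ queries, q.2 ≤ (rating.length : Int) → q.1 - 1 < q.2 →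
    (-(rating.length : Int) ≤ q.1 - 1 ∧ q.2 - (q.1 - 1) ≤ (rating.length : Int))
instance (rating : List Int) (queries : List (Int × Int)) : Decidable (Pre_countTeams rating queries) := by
  unfold Pre_countTeams; infer_instance

def pvWitness_countTeams : List Int × (List (Int × Int)) := ([1, 2, 1], [(1, 3), (1, 2)])

def Spec_countTeams (rating : List Int) (queries : List (Int × Int)) (out : List Int) : Prop :=
  out = countTeams_alt rating queries
instance (rating : List Int) (queries : List (Int × Int)) (out : List Int) : Decidable (Spec_countTeams rating queries out) := by
  unfold Spec_countTeams; infer_instance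

-- ===== CLAIM (what is proved, stated in full; the proofs are below) =====
def Claim_equal_countTeams : Prop := ∀ (rating : List Int) (queries : List (Int × Int)), Dom_countTeams rating queries → Pre_countTeams rating queries → Spec_countTeams rating queries (countTeams rating queries)

-- ===== LEMMAS AND PROOFS =====

def pvNorm (n : Nat) (i : Int) : Nat := if 0 ≤ i then i.toNat else n - (-i).toNat

lemma pvGetD_eq (xs : List Int) (i : Int) (h1 : -(xs.length : Int) ≤ i) (h2 : i < xs.length) :
    PySem.List.pyGetD xs i 0 = xs.getD (pvNorm xs.length i) 0 := by
  simp only [PySem.List.pyGetD, PySem.List.pyGet?, PySem.List.pyIdx?, pvNorm]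
  by_cases hpos : 0 ≤ i
  · simp only [hpos, if_true, if_pos h2]
    simp [List.getD_eq_getElem?_getD]
  · simp only [hpos, if_false, if_pos h1]
    simp [List.getD_eq_getElem?_getD]

lemma pvSetD_eq (xs : List Int) (i : Int) (h1 : -(xs.length : Int) ≤ i) (h2 : i < xs.length) :
    PySem.List.pySetD xs i 0 = xs.set (pvNorm xs.length i) 0 := by
  simp only [PySem.List.pySetD, PySem.List.pySet?, PySem.List.pyIdx?, pvNorm]
  by_cases hpos : 0 ≤ i
  · simp [hpos, if_pos h2]
  · simp [hpos, if_pos h1]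

lemma pvGetD_set (xs : List Int) (k p : Nat) :
    (xs.set k 0).getD p 0 = if p = k ∧ k < xs.length then 0 else xs.getD p 0 := by
  simp only [List.getD_eq_getElem?_getD, List.getElem?_set]
  split_ifs with h1 h2 h3 <;> simp_all

lemma pvFindFilter {ν : Type} (k k' : Int) (h : k' ≠ k) : ∀ (l : List (Int × ν)),
    (l.filter (fun p => !(p.1 == k))).find? (fun p => p.1 == k') = l.find? (fun p => p.1 == k') := by
  intro l
  induction l with
  | nil => rfl
  | cons p t ih =>
    by_cases hk : p.1 = k
    · have h2 : (k == k') = false := by simp [Ne.symm h]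
      simp [List.filter_cons, hk, List.find?_cons, h2, ih]
    · by_cases hk' : p.1 = k'
      · simp only [List.filter_cons, hk]
        rw [show (!p.1 == k) = true by simp [hk]]
        simp [List.find?_cons, hk']
      · simp [List.filter_cons, hk, List.find?_cons, hk', ih]

lemma pvGet?_erase_self {ν : Type} (d : PySem.Dict Int ν) (k : Int) :
    (d.erase k).get? k = none := by
  show Option.map _ (List.find? _ ((d.items).filter _)) = none
  simp only [Option.map_eq_none_iff, List.find?_eq_none]
  intro p hp
  have := List.of_mem_filter hp
  simp only [Bool.not_eq_true'] at this
  simp [this]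

lemma pvGet?_erase_ne {ν : Type} (d : PySem.Dict Int ν) (k k' : Int) (h : k' ≠ k) :
    (d.erase k).get? k' = d.get? k' := by
  show Option.map _ (List.find? _ ((d.items).filter _)) = Option.map _ (List.find? _ _)
  rw [pvFindFilter k k' h]

lemma pvSum_update (S : List Int) (hS : S.Nodup) (f g : Int → Int) (v0 : Int)
    (hv : v0 ∈ S) (hfg : ∀ v ∈ S, v ≠ v0 → f v = g v) :
    (S.map g).sum = (S.map f).sum + (g v0 - f v0) := by
  induction S with
  | nil => simp at hv
  | cons x t ih =>
    simp only [List.nodup_cons] at hS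
    rcases List.mem_cons.mp hv with h | h
    · subst h
      have hrest : ∀ v ∈ t, g v = f v := fun v hvt =>
        (hfg v (List.mem_cons_of_mem _ hvt) (by rintro rfl; exact hS.1 hvt)).symm
      simp only [List.map_cons, List.sum_cons]
      rw [List.map_congr_left hrest]
      ring
    · have := ih hS.2 h (fun v hvt hne => hfg v (List.mem_cons_of_mem _ hvt) hne)
      simp only [List.map_cons, List.sum_cons, this]
      rw [hfg x (List.mem_cons_self) (by rintro rfl; exact hS.1 h)]
      ring

lemma pvNorm_lt (n : Nat) (i : Int) (h1 : -(n : Int) ≤ i) (h2 : i < n) : pvNorm n i < n := by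
  unfold pvNorm; split_ifs <;> omega

lemma pvNorm_cast (n : Nat) (i : Int) (h1 : -(n : Int) ≤ i) (h2 : i < n) :
    (pvNorm n i : Int) = if i < 0 then i + n else i := by
  unfold pvNorm; split_ifs <;> omega

def pvVal (a : List Int) (i : Int) : Int := PySem.List.pyGetD a i 0
def pvOcc (a : List Int) (v : Int) (Q : List Int) : List Int :=
  Q.filter (fun i => pvVal a i == v)
def pvZocc (a : List Int) (v : Int) (Q : List Int) : List Int :=
  if (pvOcc a v Q).length % 2 = 0 then pvOcc a v Q else (pvOcc a v Q).dropLast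
def pvZA (a : List Int) (Q : List Int) : List Int :=
  Q.filter (fun i => pvVal a i ≠ 0 ∧ i ∈ pvZocc a (pvVal a i) Q)
def pvS (a : List Int) (Q : List Int) : List Int :=
  PySem.Set.ofList ((Q.filter (fun i => pvVal a i ≠ 0)).map (pvVal a))
def pvTeams (a : List Int) (Q : List Int) : Int :=
  ((pvS a Q).map (fun v => (((pvOcc a v Q).length / 2 : Nat) : Int))).sum

lemma pvMem_S_iff (a : List Int) (Q : List Int) (v : Int) (hv : v ≠ 0) :
    v ∈ pvS a Q ↔ pvOcc a v Q ≠ [] := by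
  unfold pvS pvOcc
  rw [PySem.Set.mem_ofList]
  simp only [List.mem_map, List.mem_filter, ne_eq, List.filter_eq_nil_iff, not_forall]
  constructor
  · rintro ⟨i, ⟨hiQ, hnz⟩, rfl⟩
    exact ⟨i, hiQ, by simp⟩
  · rintro ⟨i, hiQ, hmatch⟩
    rw [not_not] at hmatch
    have heq : pvVal a i = v := by simpa using hmatch
    exact ⟨i, ⟨hiQ, by simp [heq, hv]⟩, heq⟩

lemma pvTake_pairs (o : List Int) :
    o.take (2 * (o.length / 2)) = if o.length % 2 = 0 then o else o.dropLast := by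
  split_ifs with h
  · have h2 : 2 * (o.length / 2) = o.length := by omega
    rw [h2, List.take_length]
  · have h2 : 2 * (o.length / 2) = o.length - 1 := by omega
    rw [h2, ← List.dropLast_eq_take]


lemma pvZeroList (x : List Int) (idxs : List Int)
    (hb : ∀ i ∈ idxs, -(x.length : Int) ≤ i ∧ i < (x.length : Int)) :
    (pvZeroB x idxs).length = x.length ∧
    (∀ p : Nat, (pvZeroB x idxs).getD p 0 =
      if p ∈ idxs.map (pvNorm x.length) then 0 else x.getD p 0) := by
  induction idxs generalizing x with
  | nil => simp [pvZeroB]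
  | cons i t ih =>
    obtain ⟨h1, h2⟩ := hb i List.mem_cons_self
    have hset : PySem.List.pySetD x i 0 = x.set (pvNorm x.length i) 0 := pvSetD_eq x i h1 h2
    have hlen : (x.set (pvNorm x.length i) 0).length = x.length := by simp
    have hb' : ∀ j ∈ t, -((x.set (pvNorm x.length i) 0).length : Int) ≤ j ∧ j < ((x.set (pvNorm x.length i) 0).length : Int) := by
      intro j hj; rw [hlen]; exact hb j (List.mem_cons_of_mem _ hj)
    obtain ⟨ihl, ihp⟩ := ih (x.set (pvNorm x.length i) 0) hb'
    have hstep : pvZeroB x (i :: t) = pvZeroB (x.set (pvNorm x.length i) 0) t := by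
      simp [pvZeroB, hset]
    constructor
    · rw [hstep, ihl, hlen]
    · intro p
      rw [hstep, ihp p, hlen, pvGetD_set]
      by_cases hp : p ∈ t.map (pvNorm x.length)
      · simp [hp]
      · have hnorm : pvNorm x.length i < x.length := pvNorm_lt x.length i h1 h2
        by_cases hpi : p = pvNorm x.length i
        · simp [hp, hpi, hnorm]
        · simp [hp, hpi]

lemma pvZeroFold (a : List Int) (L : List (List Int))
    (hb : ∀ i ∈ L.flatten, -(a.length : Int) ≤ i ∧ i < (a.length : Int)) :
    (L.foldl pvZeroB a).length = a.length ∧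
    (∀ p : Nat, (L.foldl pvZeroB a).getD p 0 =
      if p ∈ L.flatten.map (pvNorm a.length) then 0 else a.getD p 0) := by
  induction L generalizing a with
  | nil => simp
  | cons idxs L' ih =>
    have hbh : ∀ i ∈ idxs, -(a.length : Int) ≤ i ∧ i < (a.length : Int) := by
      intro i hi; exact hb i (by simp [hi])
    obtain ⟨zl, zp⟩ := pvZeroList a idxs hbh
    have hb' : ∀ i ∈ L'.flatten, -((pvZeroB a idxs).length : Int) ≤ i ∧ i < ((pvZeroB a idxs).length : Int) := by
      intro i hi; rw [zl]; exact hb i (by simp only [List.flatten_cons, List.mem_append]; right; exact hi)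
    obtain ⟨il, ip⟩ := ih (pvZeroB a idxs) hb'
    constructor
    · simpa [zl] using il
    · intro p
      have := ip p
      rw [List.foldl_cons] at *
      rw [this, zl, zp p]
      by_cases hp1 : p ∈ L'.flatten.map (pvNorm a.length) <;>
        by_cases hp2 : p ∈ idxs.map (pvNorm a.length) <;>
          simp [hp1, hp2, List.flatten_cons]

lemma pvS_ne_zero (a : List Int) (Q : List Int) (v : Int) (hv : v ∈ pvS a Q) : v ≠ 0 := by
  unfold pvS at hv
  rw [PySem.Set.mem_ofList] at hv
  obtain ⟨i, hi, rfl⟩ := List.mem_map.mp hv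
  have := (List.mem_filter.mp hi).2
  simpa using this


lemma pvAinv (a : List Int) (Q : List Int)
    (hb : ∀ i ∈ Q, -(a.length : Int) ≤ i ∧ i < (a.length : Int))
    (hn : (Q.map (pvNorm a.length)).Nodup) :
    (Q.foldl pvStepA (a, PySem.Dict.empty, (0 : Int))).1.length = a.length ∧
    (∀ p : Nat, (Q.foldl pvStepA (a, PySem.Dict.empty, (0 : Int))).1.getD p 0 =
      if p ∈ (pvZA a Q).map (pvNorm a.length) then 0 else a.getD p 0) ∧
    (∀ v : Int, v ≠ 0 → (Q.foldl pvStepA (a, PySem.Dict.empty, (0 : Int))).2.1.get? v =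
      (if (pvOcc a v Q).length % 2 = 1 then (pvOcc a v Q).getLast? else none)) ∧
    (Q.foldl pvStepA (a, PySem.Dict.empty, (0 : Int))).2.2 = pvTeams a Q := by
  induction Q using List.reverseRecOn with
  | nil =>
    refine ⟨rfl, ?_, ?_, ?_⟩
    · intro p; simp [pvZA]
    · intro v hv; simp [pvOcc, PySem.Dict.get?_empty]
    · simp [pvTeams, pvS]
  | append_singleton Q' i0 ih =>
    have hb' : ∀ i ∈ Q', -(a.length : Int) ≤ i ∧ i < (a.length : Int) := by
      intro i hi; exact hb i (List.mem_append_left _ hi)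
    rw [List.map_append] at hn
    have hn' : (Q'.map (pvNorm a.length)).Nodup := (List.nodup_append.mp hn).1
    have hi0notin : pvNorm a.length i0 ∉ Q'.map (pvNorm a.length) := by
      intro hmem
      exact ((List.nodup_append.mp hn).2.2 _ hmem _ (List.mem_singleton_self _)) rfl
    have hi0Q' : i0 ∉ Q' := fun h => hi0notin (List.mem_map_of_mem h)
    have hQ'nodup : Q'.Nodup := hn'.of_map
    obtain ⟨hi0l, hi0r⟩ := hb i0 (List.mem_append_right _ (List.mem_singleton.mpr rfl))
    obtain ⟨ih1, ih2, ih3, ih4⟩ := ih hb' hn'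
    set st' := Q'.foldl pvStepA (a, PySem.Dict.empty, (0 : Int)) with hst'
    have hread : PySem.List.pyGetD st'.1 i0 0 = pvVal a i0 := by
      have h1 : -(st'.1.length : Int) ≤ i0 := by rw [ih1]; exact hi0l
      have h2 : i0 < (st'.1.length : Int) := by rw [ih1]; exact hi0r
      rw [pvGetD_eq st'.1 i0 h1 h2, ih1, ih2 (pvNorm a.length i0)]
      have : pvNorm a.length i0 ∉ (pvZA a Q').map (pvNorm a.length) := by
        intro hmem
        obtain ⟨x, hx, hxe⟩ := List.mem_map.mp hmem
        have hxQ' : x ∈ Q' := (List.mem_filter.mp hx).1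
        exact hi0notin (hxe ▸ List.mem_map_of_mem hxQ')
      rw [if_neg this, pvVal, pvGetD_eq a i0 hi0l hi0r]
    rw [List.foldl_append, List.foldl_cons, List.foldl_nil, ← hst']
    by_cases hv0 : pvVal a i0 = 0
    · -- zero value: step is a no-op and all descriptions are unchanged
      have hstep : pvStepA st' i0 = st' := by
        simp only [pvStepA, hread, hv0]
        simp
      rw [hstep]
      have hocc : ∀ v, v ≠ 0 → pvOcc a v (Q' ++ [i0]) = pvOcc a v Q' := by
        intro v hv
        unfold pvOcc
        rw [List.filter_append]
        simp [hv0, Ne.symm hv]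
      have hZA : pvZA a (Q' ++ [i0]) = pvZA a Q' := by
        unfold pvZA
        rw [List.filter_append]
        have h1 : (([i0]).filter (fun i => decide (pvVal a i ≠ 0 ∧ i ∈ pvZocc a (pvVal a i) (Q' ++ [i0])))) = [] := by
          simp [hv0]
        rw [h1, List.append_nil]
        apply List.filter_congr
        intro x hx
        by_cases hvx : pvVal a x = 0
        · simp [hvx]
        · have : pvZocc a (pvVal a x) (Q' ++ [i0]) = pvZocc a (pvVal a x) Q' := by
            unfold pvZocc; rw [hocc _ hvx]
          rw [this]
      have hS : pvS a (Q' ++ [i0]) = pvS a Q' := by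
        unfold pvS
        rw [List.filter_append]
        simp [hv0]
      refine ⟨ih1, ?_, ?_, ?_⟩
      · intro p; rw [ih2 p, hZA]
      · intro v hv; rw [ih3 v hv, hocc v hv]
      · rw [ih4]
        unfold pvTeams
        rw [hS]
        congr 1
        apply List.map_congr_left
        intro v hvS
        rw [hocc v (pvS_ne_zero a Q' v hvS)]
    · -- nonzero value
      have hoccv0 : pvOcc a (pvVal a i0) (Q' ++ [i0]) = pvOcc a (pvVal a i0) Q' ++ [i0] := by
        unfold pvOcc; rw [List.filter_append]; simp
      have hocc_ne : ∀ v, v ≠ pvVal a i0 → pvOcc a v (Q' ++ [i0]) = pvOcc a v Q' := by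
        intro v hv
        unfold pvOcc; rw [List.filter_append]; simp [Ne.symm hv]
      have hsetD' : ∀ (xs : List Int) (i : Int), xs.length = a.length →
          -(a.length : Int) ≤ i → i < (a.length : Int) →
          PySem.List.pySetD xs i 0 = xs.set (pvNorm a.length i) 0 := by
        intro xs i hl h1 h2
        rw [pvSetD_eq xs i (by rw [hl]; exact h1) (by rw [hl]; exact h2), hl]
      by_cases hpar : (pvOcc a (pvVal a i0) Q').length % 2 = 1
      · -- odd count: A pairs i0 with the stored last occurrence j
        have hoccne : pvOcc a (pvVal a i0) Q' ≠ [] := by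
          intro h; rw [h] at hpar; simp at hpar
        obtain ⟨j, hj⟩ : ∃ j, (pvOcc a (pvVal a i0) Q').getLast? = some j := by
          cases hlast : (pvOcc a (pvVal a i0) Q').getLast? with
          | none => exact absurd (List.getLast?_eq_none_iff.mp hlast) hoccne
          | some j => exact ⟨j, rfl⟩
        have hget : st'.2.1.get? (pvVal a i0) = some j := by
          rw [ih3 (pvVal a i0) hv0, if_pos hpar, hj]
        have hjocc : j ∈ pvOcc a (pvVal a i0) Q' := List.mem_of_getLast? hj
        have hjQ' : j ∈ Q' := (List.mem_filter.mp hjocc).1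
        have hjval : pvVal a j = pvVal a i0 := by simpa using (List.mem_filter.mp hjocc).2
        obtain ⟨hjl, hjr⟩ := hb' j hjQ'
        have hcont : st'.2.1.contains (pvVal a i0) = true := by
          rw [PySem.Dict.contains_eq_isSome_get?, hget]; rfl
        have hgetD : st'.2.1.getD (pvVal a i0) 0 = j := by
          rw [PySem.Dict.getD_eq_get?_getD, hget]; rfl
        have hstep : pvStepA st' i0 =
            (PySem.List.pySetD (PySem.List.pySetD st'.1 j 0) i0 0,
              st'.2.1.erase (pvVal a i0), st'.2.2 + 1) := by
          simp only [pvStepA, hread]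
          rw [if_pos hv0, if_pos ⟨by rw [hcont], hv0⟩, hgetD]
        rw [hstep]
        -- decompositions of the occurrence list of v0
        have hzoccnew : pvZocc a (pvVal a i0) (Q' ++ [i0]) = pvOcc a (pvVal a i0) Q' ++ [i0] := by
          unfold pvZocc
          rw [hoccv0, if_pos (by simp; omega)]
        have hzoccold : pvZocc a (pvVal a i0) Q' = (pvOcc a (pvVal a i0) Q').dropLast := by
          unfold pvZocc
          rw [if_neg (by omega)]
        have hoccNodup : (pvOcc a (pvVal a i0) Q').Nodup := hQ'nodup.filter _
        have hjlast : (pvOcc a (pvVal a i0) Q').getLast hoccne = j := by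
          have h2 : (pvOcc a (pvVal a i0) Q').getLast? =
              some ((pvOcc a (pvVal a i0) Q').getLast hoccne) := List.getLast?_eq_getLast hoccne
          rw [h2] at hj
          exact Option.some.inj hj
        have hoccdecomp : pvOcc a (pvVal a i0) Q' = (pvOcc a (pvVal a i0) Q').dropLast ++ [j] := by
          conv_lhs => rw [← List.dropLast_concat_getLast hoccne]
          rw [hjlast]
        have hjnotdrop : j ∉ (pvOcc a (pvVal a i0) Q').dropLast := by
          have h2 := hoccNodup
          rw [hoccdecomp, List.nodup_append] at h2
          intro hmem
          exact (h2.2.2 j hmem j (List.mem_singleton_self _)) rfl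
        have hZAmem : ∀ x, x ∈ pvZA a (Q' ++ [i0]) ↔ (x ∈ pvZA a Q' ∨ x = j ∨ x = i0) := by
          intro x
          unfold pvZA
          simp only [List.mem_filter, List.mem_append, List.mem_singleton, decide_eq_true_eq]
          constructor
          · rintro ⟨hxQ | rfl, hxnz, hxz⟩
            · by_cases hxv : pvVal a x = pvVal a i0
              · rw [hxv, hzoccnew] at hxz
                rcases List.mem_append.mp hxz with hxo | hxi
                · rw [hoccdecomp] at hxo
                  rcases List.mem_append.mp hxo with hxd | hxj
                  · exact Or.inl ⟨hxQ, hxnz, by rw [hxv, hzoccold]; exact hxd⟩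
                  · exact Or.inr (Or.inl (List.mem_singleton.mp hxj))
                · exact absurd (List.mem_singleton.mp hxi ▸ hxQ) hi0Q'
              · have : pvZocc a (pvVal a x) (Q' ++ [i0]) = pvZocc a (pvVal a x) Q' := by
                  unfold pvZocc; rw [hocc_ne _ hxv]
                rw [this] at hxz
                exact Or.inl ⟨hxQ, hxnz, hxz⟩
            · exact Or.inr (Or.inr rfl)
          · rintro (hx | rfl | rfl)
            · obtain ⟨hxQ, hxnz, hxz⟩ := hx
              refine ⟨Or.inl hxQ, hxnz, ?_⟩
              by_cases hxv : pvVal a x = pvVal a i0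
              · rw [hxv, hzoccnew]
                apply List.mem_append_left
                rw [hoccdecomp]
                apply List.mem_append_left
                rw [hxv, hzoccold] at hxz
                exact hxz
              · have : pvZocc a (pvVal a x) (Q' ++ [i0]) = pvZocc a (pvVal a x) Q' := by
                  unfold pvZocc; rw [hocc_ne _ hxv]
                rw [this]
                exact hxz
            · refine ⟨Or.inl hjQ', by rw [hjval]; exact hv0, ?_⟩
              rw [hjval, hzoccnew]
              exact List.mem_append_left _ hjocc
            · refine ⟨Or.inr rfl, hv0, ?_⟩
              rw [hzoccnew]
              exact List.mem_append_right _ (List.mem_singleton_self _)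
        have hmapmem : ∀ p : Nat, p ∈ (pvZA a (Q' ++ [i0])).map (pvNorm a.length) ↔
            (p ∈ (pvZA a Q').map (pvNorm a.length) ∨ p = pvNorm a.length j ∨ p = pvNorm a.length i0) := by
          intro p
          simp only [List.mem_map]
          constructor
          · rintro ⟨x, hx, rfl⟩
            rcases (hZAmem x).mp hx with h | rfl | rfl
            · exact Or.inl ⟨x, h, rfl⟩
            · exact Or.inr (Or.inl rfl)
            · exact Or.inr (Or.inr rfl)
          · rintro (⟨x, hx, rfl⟩ | rfl | rfl)
            · exact ⟨x, (hZAmem x).mpr (Or.inl hx), rfl⟩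
            · exact ⟨j, (hZAmem j).mpr (Or.inr (Or.inl rfl)), rfl⟩
            · exact ⟨i0, (hZAmem i0).mpr (Or.inr (Or.inr rfl)), rfl⟩
        have e1 : PySem.List.pySetD st'.1 j 0 = st'.1.set (pvNorm a.length j) 0 :=
          hsetD' st'.1 j ih1 hjl hjr
        have hlen1 : (st'.1.set (pvNorm a.length j) 0).length = a.length := by simp [ih1]
        have e2 : PySem.List.pySetD (st'.1.set (pvNorm a.length j) 0) i0 0 =
            (st'.1.set (pvNorm a.length j) 0).set (pvNorm a.length i0) 0 :=
          hsetD' _ i0 hlen1 hi0l hi0r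
        have hni0 : pvNorm a.length i0 < a.length := pvNorm_lt a.length i0 hi0l hi0r
        have hnj : pvNorm a.length j < a.length := pvNorm_lt a.length j hjl hjr
        refine ⟨?_, ?_, ?_, ?_⟩
        · simp [PySem.List.length_pySetD, ih1]
        · intro p
          show (PySem.List.pySetD (PySem.List.pySetD st'.1 j 0) i0 0).getD p 0 = _
          rw [e1, e2, pvGetD_set, pvGetD_set, ih2 p]
          by_cases h1 : p = pvNorm a.length i0 <;>
            by_cases h2 : p = pvNorm a.length j <;>
              by_cases h3 : p ∈ (pvZA a Q').map (pvNorm a.length) <;>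
                simp [h1, h2, h3, hmapmem, hni0, hnj, hlen1, ih1]
        · intro v hv
          show (st'.2.1.erase (pvVal a i0)).get? v = _
          by_cases hvv : v = pvVal a i0
          · subst hvv
            rw [pvGet?_erase_self, hoccv0]
            rw [if_neg (by simp; omega)]
          · rw [pvGet?_erase_ne _ _ _ hvv, ih3 v hv, hocc_ne v hvv]
        · show st'.2.2 + 1 = pvTeams a (Q' ++ [i0])
          have hvS : pvVal a i0 ∈ pvS a Q' := (pvMem_S_iff a Q' _ hv0).mpr hoccne
          have hlist : ((Q' ++ [i0]).filter (fun i => decide (pvVal a i ≠ 0))).map (pvVal a) =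
              ((Q'.filter (fun i => decide (pvVal a i ≠ 0))).map (pvVal a)) ++ [pvVal a i0] := by
            rw [List.filter_append]
            simp [hv0]
          have hSnew : pvS a (Q' ++ [i0]) = pvS a Q' := by
            unfold pvS
            rw [hlist, PySem.Set.ofList_append_singleton]
            exact PySem.Set.add_of_mem hvS
          unfold pvTeams
          rw [hSnew]
          have hnd : (pvS a Q').Nodup := by unfold pvS; exact PySem.Set.nodup_ofList _
          rw [pvSum_update (pvS a Q') hnd
            (fun v => (((pvOcc a v Q').length / 2 : Nat) : Int))
            (fun v => (((pvOcc a v (Q' ++ [i0])).length / 2 : Nat) : Int))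
            (pvVal a i0) hvS
            (fun v _ hne => by simp [hocc_ne v hne])]
          have ih4' : st'.2.2 = ((pvS a Q').map (fun v => (((pvOcc a v Q').length / 2 : Nat) : Int))).sum := ih4
          rw [← ih4']
          have hc : (pvOcc a (pvVal a i0) (Q' ++ [i0])).length = (pvOcc a (pvVal a i0) Q').length + 1 := by
            rw [hoccv0]; simp
          rw [hc]
          have hk : (((pvOcc a (pvVal a i0) Q').length + 1) / 2 : Nat) = ((pvOcc a (pvVal a i0) Q').length / 2 : Nat) + 1 := by omega
          rw [hk]
          push_cast
          ring
      · -- even count: A records i0 in seen, nothing else changes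
        have hget : st'.2.1.get? (pvVal a i0) = none := by
          rw [ih3 (pvVal a i0) hv0, if_neg hpar]
        have hcont : st'.2.1.contains (pvVal a i0) = false := by
          rw [PySem.Dict.contains_eq_isSome_get?, hget]; rfl
        have hstep : pvStepA st' i0 = (st'.1, st'.2.1.insert (pvVal a i0) i0, st'.2.2) := by
          simp only [pvStepA, hread]
          rw [if_pos hv0, if_neg (by rintro ⟨hc1, -⟩; rw [hcont] at hc1; exact absurd hc1 (by simp))]
        rw [hstep]
        have hzoccnew : pvZocc a (pvVal a i0) (Q' ++ [i0]) = pvOcc a (pvVal a i0) Q' := by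
          unfold pvZocc
          rw [hoccv0, if_neg (by simp; omega)]
          exact List.dropLast_concat
        have hzoccold : pvZocc a (pvVal a i0) Q' = pvOcc a (pvVal a i0) Q' := by
          unfold pvZocc
          rw [if_pos (by omega)]
        have hZA : pvZA a (Q' ++ [i0]) = pvZA a Q' := by
          unfold pvZA
          rw [List.filter_append]
          have hpred : ¬ (pvVal a i0 ≠ 0 ∧ i0 ∈ pvZocc a (pvVal a i0) (Q' ++ [i0])) := by
            rintro ⟨-, hmem⟩
            rw [hzoccnew] at hmem
            exact hi0Q' ((List.mem_filter.mp hmem).1)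
          rw [show ([i0].filter (fun i => decide (pvVal a i ≠ 0 ∧ i ∈ pvZocc a (pvVal a i) (Q' ++ [i0])))) = [] by simp only [List.filter_cons, List.filter_nil]; rw [if_neg (by simpa using hpred)]]
          rw [List.append_nil]
          apply List.filter_congr
          intro x hx
          by_cases hxv : pvVal a x = pvVal a i0
          · rw [hxv, hzoccnew, hzoccold]
          · have : pvZocc a (pvVal a x) (Q' ++ [i0]) = pvZocc a (pvVal a x) Q' := by
              unfold pvZocc; rw [hocc_ne _ hxv]
            rw [this]
        refine ⟨ih1, ?_, ?_, ?_⟩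
        · intro p; rw [ih2 p, hZA]
        · intro v hv
          show ((st'.2.1.insert (pvVal a i0) i0).get? v) = _
          by_cases hvv : v = pvVal a i0
          · subst hvv
            rw [PySem.Dict.get?_insert_self, hoccv0, if_pos (by simp; omega),
              List.getLast?_concat]
          · rw [PySem.Dict.get?_insert_of_ne _ _ hvv, ih3 v hv, hocc_ne v hvv]
        · show st'.2.2 = pvTeams a (Q' ++ [i0])
          have hlist : ((Q' ++ [i0]).filter (fun i => decide (pvVal a i ≠ 0))).map (pvVal a) =
              ((Q'.filter (fun i => decide (pvVal a i ≠ 0))).map (pvVal a)) ++ [pvVal a i0] := by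
            rw [List.filter_append]
            simp [hv0]
          have hgv : ∀ v ∈ pvS a Q', v = pvVal a i0 →
              (((pvOcc a v (Q' ++ [i0])).length / 2 : Nat) : Int) = (((pvOcc a v Q').length / 2 : Nat) : Int) := by
            rintro v _ rfl
            rw [hoccv0]
            congr 1
            simp
            omega
          unfold pvTeams
          by_cases hvS : pvVal a i0 ∈ pvS a Q'
          · have hSnew : pvS a (Q' ++ [i0]) = pvS a Q' := by
              unfold pvS
              rw [hlist, PySem.Set.ofList_append_singleton]
              exact PySem.Set.add_of_mem hvS
            rw [hSnew]
            have hmapeq : (pvS a Q').map (fun v => (((pvOcc a v (Q' ++ [i0])).length / 2 : Nat) : Int)) =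
                (pvS a Q').map (fun v => (((pvOcc a v Q').length / 2 : Nat) : Int)) :=
              List.map_congr_left (fun v hvmem => by
                by_cases hvv : v = pvVal a i0
                · exact hgv v hvmem hvv
                · rw [hocc_ne v hvv])
            rw [hmapeq]
            exact ih4
          · have hSnew : pvS a (Q' ++ [i0]) = pvS a Q' ++ [pvVal a i0] := by
              unfold pvS
              rw [hlist, PySem.Set.ofList_append_singleton]
              exact PySem.Set.add_of_not_mem hvS
            rw [hSnew, List.map_append, List.sum_append, List.map_singleton, List.sum_singleton]
            have hocc0 : pvOcc a (pvVal a i0) Q' = [] := by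
              by_contra hne
              exact hvS ((pvMem_S_iff a Q' _ hv0).mpr hne)
            have hgv0 : (((pvOcc a (pvVal a i0) (Q' ++ [i0])).length / 2 : Nat) : Int) = 0 := by
              rw [hoccv0, hocc0]
              simp
            rw [hgv0, add_zero]
            have hmapeq : (pvS a Q').map (fun v => (((pvOcc a v (Q' ++ [i0])).length / 2 : Nat) : Int)) =
                (pvS a Q').map (fun v => (((pvOcc a v Q').length / 2 : Nat) : Int)) :=
              List.map_congr_left (fun v hvmem => by
                have hvv : v ≠ pvVal a i0 := fun h => hvS (h ▸ hvmem)
                rw [hocc_ne v hvv])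
            rw [hmapeq]
            exact ih4




def pvNZ (a : List Int) (Q : List Int) : List Int := Q.filter (fun i => decide (pvVal a i ≠ 0))
def pvOccNZ (a : List Int) (v : Int) (Q : List Int) : List Int :=
  (pvNZ a Q).filter (fun i => pvVal a i == v)

lemma pvOccNZ_eq (a : List Int) (v : Int) (Q : List Int) (hv : v ≠ 0) :
    pvOccNZ a v Q = pvOcc a v Q := by
  unfold pvOccNZ pvNZ pvOcc
  rw [List.filter_filter]
  apply List.filter_congr
  intro x _
  by_cases hx : pvVal a x = v
  · simp [hx, hv]
  · simp [hx]

lemma pvBuild_keys (a : List Int) (l r : Int) :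
    (pvBuildB a l r).keys = pvS a (PySem.List.pyRange (l - 1) r 1) := by
  have hb1 : pvBuildB a l r = (PySem.List.pyRange (l - 1) r 1).foldl
      (fun d i => if pvVal a i ≠ 0 then d.modify (pvVal a i) [] (fun idxs => idxs ++ [i]) else d)
      PySem.Dict.empty := rfl
  rw [hb1, PySem.List.foldl_ite_eq_foldl_filter]
  rw [PySem.Dict.keys_foldl_modify_key _ (pvVal a) [] (fun _ i => fun idxs => idxs ++ [i])]
  rw [show (PySem.Dict.empty : PySem.Dict Int (List Int)).keys = [] from rfl]
  rw [PySem.Set.update_nil_left]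
  rfl

lemma pvBuild_getD (a : List Int) (l r : Int) (c : Int) :
    (pvBuildB a l r).getD c [] = pvOccNZ a c (PySem.List.pyRange (l - 1) r 1) := by
  have hb1 : pvBuildB a l r = (PySem.List.pyRange (l - 1) r 1).foldl
      (fun d i => if pvVal a i ≠ 0 then d.modify (pvVal a i) [] (fun idxs => idxs ++ [i]) else d)
      PySem.Dict.empty := rfl
  rw [hb1, PySem.List.foldl_ite_eq_foldl_filter]
  have h2 : (pvNZ a (PySem.List.pyRange (l - 1) r 1)).foldl
      (fun d i => d.modify (pvVal a i) [] (fun idxs => idxs ++ [i])) PySem.Dict.empty =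
      ((pvNZ a (PySem.List.pyRange (l - 1) r 1)).map (fun i => (pvVal a i, i))).foldl
      (fun d p => d.modify p.1 [] (fun idxs => idxs ++ [p.2])) PySem.Dict.empty := by
    rw [List.foldl_map]
  rw [show (List.filter (fun x => decide (pvVal a x ≠ 0)) (PySem.List.pyRange (l - 1) r 1)) = pvNZ a (PySem.List.pyRange (l - 1) r 1) from rfl]
  rw [h2, PySem.Dict.getD_foldl_modify_append]
  rw [PySem.Dict.getD_empty, List.nil_append]
  rw [List.filter_map, List.map_map]
  unfold pvOccNZ
  congr 1
  · exact List.map_id _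

lemma pvStepA_len (st : List Int × PySem.Dict Int Int × Int) (i : Int) :
    (pvStepA st i).1.length = st.1.length := by
  simp only [pvStepA]
  split_ifs <;> simp [PySem.List.length_pySetD]

lemma pvFoldA_len (Q : List Int) (st : List Int × PySem.Dict Int Int × Int) :
    (Q.foldl pvStepA st).1.length = st.1.length := by
  induction Q generalizing st with
  | nil => rfl
  | cons i t ih => rw [List.foldl_cons, ih, pvStepA_len]

lemma pvQueryA_len (rat : List Int) (q : Int × Int) : (pvQueryA rat q).1.length = rat.length := by
  unfold pvQueryA
  split_ifs
  · exact pvFoldA_len _ _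
  · rfl

lemma pvExtGetD (xs ys : List Int) (hl : xs.length = ys.length)
    (h : ∀ p : Nat, xs.getD p 0 = ys.getD p 0) : xs = ys := by
  apply List.ext_getElem hl
  intro idx h1 h2
  have := h idx
  rwa [List.getD_eq_getElem xs 0 h1, List.getD_eq_getElem ys 0 h2] at this

lemma pvQuery_eq (rat : List Int) (q : Int × Int)
    (hpre : q.2 ≤ (rat.length : Int) → q.1 - 1 < q.2 →
      (-(rat.length : Int) ≤ q.1 - 1 ∧ q.2 - (q.1 - 1) ≤ (rat.length : Int))) :
    pvQueryA rat q = pvQueryB rat q := by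
  simp only [pvQueryA, pvQueryB]
  by_cases hr : q.2 ≤ PySem.List.len rat
  case neg => rw [if_neg hr, if_neg hr]
  rw [if_pos hr, if_pos hr]
  rw [PySem.List.len_eq] at hr
  set W := PySem.List.pyRange (q.1 - 1) q.2 1 with hW
  have hbW : ∀ i ∈ W, -(rat.length : Int) ≤ i ∧ i < (rat.length : Int) := by
    intro i hi
    rw [hW, PySem.List.mem_pyRange_one] at hi
    have hlt : q.1 - 1 < q.2 := lt_of_le_of_lt hi.1 hi.2
    obtain ⟨h1, _⟩ := hpre hr hlt
    exact ⟨le_trans h1 hi.1, lt_of_lt_of_le hi.2 hr⟩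
  have hnW : (W.map (pvNorm rat.length)).Nodup := by
    apply List.Nodup.map_on _ (PySem.List.nodup_pyRange_one _ _)
    intro x hx y hy hxy
    rw [PySem.List.mem_pyRange_one] at hx hy
    have hlt : q.1 - 1 < q.2 := lt_of_le_of_lt hx.1 hx.2
    obtain ⟨h1, h2⟩ := hpre hr hlt
    have hbx := hbW x (by rw [hW, PySem.List.mem_pyRange_one]; exact hx)
    have hby := hbW y (by rw [hW, PySem.List.mem_pyRange_one]; exact hy)
    clear hW
    have cx := pvNorm_cast rat.length x hbx.1 hbx.2
    have cy := pvNorm_cast rat.length y hby.1 hby.2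
    have : (pvNorm rat.length x : Int) = (pvNorm rat.length y : Int) := by rw [hxy]
    rw [cx, cy] at this
    split_ifs at this <;> omega
  obtain ⟨ih1, ih2, ih3, ih4⟩ := pvAinv rat W hbW hnW
  -- B: the dictionary
  have hkeys : (pvBuildB rat q.1 q.2).keys = pvS rat W := pvBuild_keys rat q.1 q.2
  have hknd : (pvBuildB rat q.1 q.2).keys.Nodup := by
    rw [hkeys]; unfold pvS; exact PySem.Set.nodup_ofList _
  have hvals : (pvBuildB rat q.1 q.2).values =
      (pvS rat W).map (fun v => pvOccNZ rat v W) := by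
    rw [PySem.Dict.values_eq_map_keys _ hknd ([] : List Int), hkeys]
    apply List.map_congr_left
    intro v _
    rw [pvBuild_getD]
  -- B: split the result fold into the array part and the team count
  have hsplit : (pvBuildB rat q.1 q.2).values.foldl (fun s idxs =>
        (pvZeroB s.1 (idxs.take (2 * (idxs.length / 2))), s.2 + ((idxs.length / 2 : Nat) : Int)))
        (rat, (0 : Int)) =
      ((pvBuildB rat q.1 q.2).values.foldl (fun x idxs => pvZeroB x (idxs.take (2 * (idxs.length / 2)))) rat,
       (pvBuildB rat q.1 q.2).values.foldl (fun t idxs => t + ((idxs.length / 2 : Nat) : Int)) 0) := by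
    have hfun : (fun (s : List Int × Int) (idxs : List Int) =>
        (pvZeroB s.1 (idxs.take (2 * (idxs.length / 2))), s.2 + ((idxs.length / 2 : Nat) : Int))) =
      (fun (s : List Int × Int) (e : List Int) =>
        ((fun (x : List Int) (idxs : List Int) => pvZeroB x (idxs.take (2 * (idxs.length / 2)))) s.1 e,
         (fun (t : Int) (idxs : List Int) => t + ((idxs.length / 2 : Nat) : Int)) s.2 e)) := rfl
    rw [hfun, PySem.List.foldl_prod_mk
      (f := fun (x : List Int) (idxs : List Int) => pvZeroB x (idxs.take (2 * (idxs.length / 2))))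
      (g := fun (t : Int) (idxs : List Int) => t + ((idxs.length / 2 : Nat) : Int))]
  -- teams agree
  have hteams : (pvBuildB rat q.1 q.2).values.foldl (fun t idxs => t + ((idxs.length / 2 : Nat) : Int)) 0 =
      pvTeams rat W := by
    rw [PySem.List.foldl_add, hvals, List.map_map]
    unfold pvTeams
    rw [zero_add]
    congr 1
    apply List.map_congr_left
    intro v hv
    simp only [Function.comp]
    rw [pvOccNZ_eq rat v W (pvS_ne_zero rat W v hv)]
  -- arrays agree
  have harr : (pvBuildB rat q.1 q.2).values.foldl (fun x idxs => pvZeroB x (idxs.take (2 * (idxs.length / 2)))) rat =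
      (W.foldl pvStepA (rat, PySem.Dict.empty, 0)).1 := by
    set L := (pvS rat W).map (fun v => (pvOccNZ rat v W).take (2 * ((pvOccNZ rat v W).length / 2))) with hL
    have hfold : (pvBuildB rat q.1 q.2).values.foldl
        (fun x idxs => pvZeroB x (idxs.take (2 * (idxs.length / 2)))) rat = L.foldl pvZeroB rat := by
      rw [hvals, List.foldl_map, hL, List.foldl_map]
    have hbL : ∀ i ∈ L.flatten, -(rat.length : Int) ≤ i ∧ i < (rat.length : Int) := by
      intro i hi
      obtain ⟨lst, hlst, hilst⟩ := List.mem_flatten.mp hi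
      rw [hL] at hlst
      obtain ⟨v, _, rfl⟩ := List.mem_map.mp hlst
      have : i ∈ pvOccNZ rat v W := List.mem_of_mem_take hilst
      have hiW : i ∈ W := (List.mem_filter.mp (List.mem_filter.mp this).1).1
      exact hbW i hiW
    obtain ⟨zl, zp⟩ := pvZeroFold rat L hbL
    have hmem : ∀ x, x ∈ pvZA rat W ↔ x ∈ L.flatten := by
      intro x
      constructor
      · intro hx
        obtain ⟨hxW, hxp⟩ := List.mem_filter.mp hx
        simp only [decide_eq_true_eq] at hxp
        obtain ⟨hxnz, hxz⟩ := hxp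
        have hxocc : x ∈ pvOcc rat (pvVal rat x) W := by
          unfold pvZocc at hxz
          split_ifs at hxz
          · exact hxz
          · exact List.dropLast_subset _ hxz
        have hvS : pvVal rat x ∈ pvS rat W :=
          (pvMem_S_iff rat W _ hxnz).mpr (List.ne_nil_of_mem hxocc)
        apply List.mem_flatten.mpr
        refine ⟨(pvOccNZ rat (pvVal rat x) W).take (2 * ((pvOccNZ rat (pvVal rat x) W).length / 2)), ?_, ?_⟩
        · rw [hL]; exact List.mem_map_of_mem hvS
        · rw [pvOccNZ_eq rat _ W hxnz, pvTake_pairs]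
          unfold pvZocc at hxz
          split_ifs at hxz with hp
          · rw [if_pos hp]; exact hxz
          · rw [if_neg hp]; exact hxz
      · intro hx
        obtain ⟨lst, hlst, hilst⟩ := List.mem_flatten.mp hx
        rw [hL] at hlst
        obtain ⟨v, hvS, rfl⟩ := List.mem_map.mp hlst
        have hvnz : v ≠ 0 := pvS_ne_zero rat W v hvS
        rw [pvOccNZ_eq rat v W hvnz, pvTake_pairs] at hilst
        have hxocc : x ∈ pvOcc rat v W := by
          split_ifs at hilst
          · exact hilst
          · exact List.dropLast_subset _ hilst
        obtain ⟨hxW, hxv⟩ := List.mem_filter.mp hxocc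
        have hxveq : pvVal rat x = v := by simpa using hxv
        apply List.mem_filter.mpr
        refine ⟨hxW, ?_⟩
        simp only [decide_eq_true_eq]
        refine ⟨hxveq ▸ hvnz, ?_⟩
        rw [hxveq]
        unfold pvZocc
        split_ifs at hilst ⊢ with hpf
        · exact hilst
        · exact hilst
      -- done
    apply Eq.symm
    apply pvExtGetD
    · rw [ih1, hfold, zl]
    · intro p
      rw [hfold, zp p, ih2 p]
      have : p ∈ (pvZA rat W).map (pvNorm rat.length) ↔ p ∈ L.flatten.map (pvNorm rat.length) := by
        simp only [List.mem_map]
        constructor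
        · rintro ⟨x, hx, rfl⟩; exact ⟨x, (hmem x).mp hx, rfl⟩
        · rintro ⟨x, hx, rfl⟩; exact ⟨x, (hmem x).mpr hx, rfl⟩
      by_cases hp : p ∈ (pvZA rat W).map (pvNorm rat.length)
      · rw [if_pos hp, if_pos (this.mp hp)]
      · rw [if_neg hp, if_neg (fun hc => hp (this.mpr hc))]
  rw [hsplit, hteams, harr, ih4]

lemma pvFold_eq (n : Nat) (queries : List (Int × Int)) :
    ∀ st : List Int × List Int, st.1.length = n →
    (∀ q ∈ queries, q.2 ≤ (n : Int) → q.1 - 1 < q.2 →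
      (-(n : Int) ≤ q.1 - 1 ∧ q.2 - (q.1 - 1) ≤ (n : Int))) →
    queries.foldl (fun st q => let out := pvQueryA st.1 q; (out.1, st.2 ++ [out.2])) st =
    queries.foldl (fun st q => let out := pvQueryB st.1 q; (out.1, st.2 ++ [out.2])) st := by
  induction queries with
  | nil => intro st _ _; rfl
  | cons q t ih =>
    intro st hlen hpre
    rw [List.foldl_cons, List.foldl_cons]
    have hq : pvQueryA st.1 q = pvQueryB st.1 q :=
      pvQuery_eq st.1 q (by rw [hlen]; exact hpre q List.mem_cons_self)
    show t.foldl (fun st q => let out := pvQueryA st.1 q; (out.1, st.2 ++ [out.2]))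
        ((pvQueryA st.1 q).1, st.2 ++ [(pvQueryA st.1 q).2]) =
      t.foldl (fun st q => let out := pvQueryB st.1 q; (out.1, st.2 ++ [out.2]))
        ((pvQueryB st.1 q).1, st.2 ++ [(pvQueryB st.1 q).2])
    rw [← hq]
    exact ih ((pvQueryA st.1 q).1, st.2 ++ [(pvQueryA st.1 q).2])
      (by rw [pvQueryA_len]; exact hlen)
      (fun q' hq' => hpre q' (List.mem_cons_of_mem _ hq'))

-- ===== VERDICT (by name: the statement is the Claim_ definition above) =====
theorem countTeams_spec : Claim_equal_countTeams := by
  intro rating queries _ hpre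
  unfold Spec_countTeams countTeams countTeams_alt
  rw [pvFold_eq rating.length queries (rating, []) rfl (fun q hq => hpre q hq)]
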